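-- pv_equiv track=rewrite | github.com/SWeszler/google-kickstart | 2020_H/H2/h2pp2.py | solution_fastest
-- ===== SOURCE A (Python) =====
-- def solution_fastest(L, R):
--     intervals = []
--     l = 1
--     last = 0
--     rsum = 0
--     lsum = 0
--
--     while 10**l - 10**(l-1) < R - last:
--         intervals.append([last + 1, last + 10**l - 10**(l-1), l])
--         last += 10**l - 10**(l-1)
--         l += 1
--
--     while last < R:
--         if R - last < 10:
--             intervals.append([last + 1, R, 0])
--             break
--         elif 10**(l-1) < R - last:
--             intervals.append([last + 1, last + 10**(l-1), l-1])
--             last += 10**(l-1)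
--         else:
--             l -= 1
--
--     for s, e, l in intervals:
--         if l != 0:
--             e = s
--         for n in range(s, e + 1):
--             i = 1
--             boring = True
--             for d in str(n):
--                 if i % 2 != int(d) % 2:
--                     boring = False
--                 i += 1
--                 if i > len(str(n)) - l:
--                     break
--             if boring and l == 0:
--                 rsum += 1
--
--         if boring and l != 0:
--             rsum += 5**l
--
--     l = 1
--     last = 0
--     intervals = []
--     while 10**l - 10**(l-1) < L - last:
--         intervals.append([last + 1, last + 10**l - 10**(l-1), l])
--         last += 10**l - 10**(l-1)
--         l += 1
--
--     while last < L - 1: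
--         if L - last < 10:
--             intervals.append([last + 1, L - 1, 0])
--             break
--         elif 10**(l-1) < L - 1 - last:
--             intervals.append([last + 1, last + 10**(l-1), l-1])
--             last += 10**(l-1)
--         else:
--             l -= 1
--
--     for s, e, l in intervals:
--         if l != 0:
--             e = s
--         for n in range(s, e + 1):
--             i = 1
--             boring = True
--             for d in str(n):
--                 if i % 2 != int(d) % 2:
--                     boring = False
--                 i += 1
--                 if i > len(str(n)) - l:
--                     break
--             if boring and l == 0:
--                 lsum += 1
--
--         if boring and l != 0:
--             lsum += 5**l
--
--     return rsum - lsum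
-- ===== SOURCE B (Python) =====
-- def _count(n):
--     # number of x in [1, n] whose 1-indexed decimal digits satisfy digit_i % 2 == i % 2
--     if n <= 0:
--         return 0
--     s = str(n)
--     m = len(s)
--     total = sum(5 ** j for j in range(1, m))  # all valid numbers with fewer digits
--     for i in range(m):
--         d = int(s[i])
--         want = (i + 1) % 2
--         start = 1 if i == 0 else 0
--         total += sum(1 for x in range(start, d) if x % 2 == want) * 5 ** (m - 1 - i)
--         if d % 2 != want:
--             return total
--     return total + 1
--
--
-- def solution_fastest(L, R):
--     return _count(R) - _count(L - 1)
-- ===== Notes on version B (the rewrite author's own statement) =====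
-- stated objective: faster
-- what changed: Replaced A's explicit interval decomposition (building a list of decade/chunk intervals by three while-loops, then re-scanning each interval's start via string digit checks) with a single most-significant-first digit-DP pass computing count(N) in closed form per digit position, returning count(R) - count(L-1).
import Mathlib
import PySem

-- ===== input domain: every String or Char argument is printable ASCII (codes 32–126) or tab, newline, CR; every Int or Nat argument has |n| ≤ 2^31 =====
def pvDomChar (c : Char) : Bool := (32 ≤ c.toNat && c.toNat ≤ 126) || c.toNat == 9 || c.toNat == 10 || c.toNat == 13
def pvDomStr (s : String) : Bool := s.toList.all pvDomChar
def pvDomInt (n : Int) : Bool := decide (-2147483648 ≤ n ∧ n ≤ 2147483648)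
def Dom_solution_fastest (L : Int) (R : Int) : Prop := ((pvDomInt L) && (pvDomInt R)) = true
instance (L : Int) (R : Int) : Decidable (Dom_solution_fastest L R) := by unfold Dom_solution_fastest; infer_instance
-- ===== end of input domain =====

-- B re-implements A's interval-decomposition count of alternating-parity-digit numbers in [L,R]
-- as a single most-significant-first digit-DP pass (count(R) - count(L-1)); faster by a constant factor.

-- ===== PORT A =====

-- 10**l / 5**l (the exponent is ≥ 0 wherever A evaluates these)
def pwA (b : Int) (l : Int) : Int := b ^ l.toNat

-- int(d) for one digit character d of str(n), n ≥ 0 (exact there)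
def digitInt (c : Char) : Int := (c.toNat : Int) - 48

-- 'for d in str(n): if i % 2 != int(d) % 2: boring = False; i += 1; if i > stop: break'
def digitLoopA (cs : List Char) (i : Int) (stop : Int) (boring : Bool) : Bool :=
  match cs with
  | [] => boring
  | c :: rest =>
    let b := if PySem.Int.mod i 2 ≠ PySem.Int.mod (digitInt c) 2 then false else boring
    if i + 1 > stop then b else digitLoopA rest (i + 1) stop b

-- the per-n check: i = 1; boring = True; inner digit loop with break at len(str(n)) - l
def checkA (n : Int) (l : Int) : Bool :=
  digitLoopA (PySem.Int.toChars n) 1 (PySem.List.len (PySem.Int.toChars n) - l) true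

-- one iteration of 'for s, e, l in intervals' (state: accumulated sum and the live 'boring')
def procIntervalA (ab : Int × Bool) (iv : Int × Int × Int) : Int × Bool :=
  let s := iv.1
  let l := iv.2.2
  let e := if l ≠ 0 then s else iv.2.1
  let r := (PySem.List.pyRange s (e + 1) 1).foldl
    (fun (ab : Int × Bool) n =>
      let b := checkA n l
      (if b && (l == 0) then ab.1 + 1 else ab.1, b)) ab
  if r.2 && !(l == 0) then (r.1 + pwA 5 l, r.2) else r

def procAllA (ivs : List (Int × Int × Int)) (ab : Int × Bool) : Int × Bool :=
  ivs.foldl procIntervalA ab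

-- 'while 10**l - 10**(l-1) < X - last: intervals.append(...); last += ...; l += 1'
def loop1A (X : Int) (l : Int) (last : Int) (acc : List (Int × Int × Int)) :
    List (Int × Int × Int) × Int × Int :=
  if h : pwA 10 l - pwA 10 (l - 1) < X - last then
    loop1A X (l + 1) (last + (pwA 10 l - pwA 10 (l - 1)))
      (acc ++ [(last + 1, last + (pwA 10 l - pwA 10 (l - 1)), l)])
  else (acc, l, last)
termination_by ((X - last).toNat, (1 - l).toNat)
decreasing_by
  by_cases hl : 1 ≤ l
  · left
    have h9 : (9 : Int) ≤ pwA 10 l - pwA 10 (l - 1) := by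
      unfold pwA
      have h1 : (l - 1).toNat + 1 = l.toNat := by omega
      have : (10 : Int) ^ l.toNat = 10 ^ ((l-1).toNat) * 10 := by rw [← h1]; ring
      have hp : (1 : Int) ≤ 10 ^ ((l-1).toNat) := one_le_pow₀ (by norm_num)
      rw [this]; nlinarith
    omega
  · have hz : pwA 10 l - pwA 10 (l - 1) = 0 := by
      unfold pwA
      have h1 : l.toNat = 0 := by omega
      have h2 : (l - 1).toNat = 0 := by omega
      rw [h1, h2]; norm_num
    rw [hz, add_zero]
    right
    omega

-- phase-1 'while last < R: ...' (the second while of A's R half)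
def loop2RA (R : Int) (l : Int) (last : Int) (acc : List (Int × Int × Int)) :
    List (Int × Int × Int) :=
  if hw : last < R then
    if h1 : R - last < 10 then acc ++ [(last + 1, R, 0)]
    else if h2 : pwA 10 (l - 1) < R - last then
      loop2RA R l (last + pwA 10 (l - 1)) (acc ++ [(last + 1, last + pwA 10 (l - 1), l - 1)])
    else loop2RA R (l - 1) last acc
  else acc
termination_by ((R - last).toNat, l.toNat)
decreasing_by
  · left
    have : (1 : Int) ≤ pwA 10 (l - 1) := one_le_pow₀ (by norm_num)
    omega
  · right
    have h10 : (10 : Int) ≤ pwA 10 (l - 1) := by omega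
    have hl : 1 ≤ (l - 1).toNat := by
      by_contra hc
      have : (l - 1).toNat = 0 := by omega
      unfold pwA at h10; rw [this] at h10; norm_num at h10
    omega

-- phase-2 'while last < L - 1: ...' (the second while of A's L half; note the L vs L-1 asymmetry)
def loop2LA (L : Int) (l : Int) (last : Int) (acc : List (Int × Int × Int)) :
    List (Int × Int × Int) :=
  if hw : last < L - 1 then
    if h1 : L - last < 10 then acc ++ [(last + 1, L - 1, 0)]
    else if h2 : pwA 10 (l - 1) < L - 1 - last then
      loop2LA L l (last + pwA 10 (l - 1)) (acc ++ [(last + 1, last + pwA 10 (l - 1), l - 1)])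
    else loop2LA L (l - 1) last acc
  else acc
termination_by ((L - 1 - last).toNat, l.toNat)
decreasing_by
  · left
    have : (1 : Int) ≤ pwA 10 (l - 1) := one_le_pow₀ (by norm_num)
    omega
  · right
    have h10 : (9 : Int) ≤ pwA 10 (l - 1) := by omega
    have hl : 1 ≤ (l - 1).toNat := by
      by_contra hc
      have : (l - 1).toNat = 0 := by omega
      unfold pwA at h10; rw [this] at h10; norm_num at h10
    omega

def solution_fastest (L : Int) (R : Int) : Int :=
  let p1 := loop1A R 1 0 []
  let ivsR := loop2RA R p1.2.1 p1.2.2 p1.1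
  let r := procAllA ivsR (0, false)   -- 'boring' starts undefined in Python; never read before set
  let p2 := loop1A L 1 0 []
  let ivsL := loop2LA L p2.2.1 p2.2.2 p2.1
  let s := procAllA ivsL (0, r.2)     -- Python's 'boring' persists across the two halves
  r.1 - s.1

-- ===== PORT B =====

-- int(s[i]) via int(); exact on the digit characters of str(n), n ≥ 1
def digitIntB (c : Char) : Int := (PySem.Int.ofChars? [c]).getD 0

-- 'for i in range(m): ...' of _count, walking the digit characters with index i
def scanB (cs : List Char) (m : Int) (i : Int) (total : Int) : Int :=
  match cs with
  | [] => total + 1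
  | c :: rest =>
    let d := digitIntB c
    let want := PySem.Int.mod (i + 1) 2
    let start : Int := if i == 0 then 1 else 0
    let total := total +
      ((PySem.List.pyRange start d 1).filter (fun x => PySem.Int.mod x 2 == want)).length *
        (5 : Int) ^ (m - 1 - i).toNat
    if PySem.Int.mod d 2 ≠ want then total else scanB rest m (i + 1) total

def countB (n : Int) : Int :=
  if n ≤ 0 then 0
  else
    let s := PySem.Int.toChars n
    let m := PySem.List.len s
    scanB s m 0 (((PySem.List.pyRange 1 m 1).map (fun j => (5 : Int) ^ j.toNat)).sum)

def solution_fastest_alt (L : Int) (R : Int) : Int := countB R - countB (L - 1)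

-- ===== PRECONDITION & SPEC =====
def Spec_solution_fastest (L : Int) (R : Int) (out : Int) : Prop := out = solution_fastest_alt L R
instance (L : Int) (R : Int) (out : Int) : Decidable (Spec_solution_fastest L R out) := by unfold Spec_solution_fastest; infer_instance

-- ===== CLAIM (what is proved, stated in full; the proofs are below) =====
def Claim_equal_solution_fastest : Prop := ∀ (L : Int) (R : Int), Dom_solution_fastest L R → Spec_solution_fastest L R (solution_fastest L R)

-- ===== LEMMAS AND PROOFS =====

-- big-endian decimal digits
def dBE (n : Nat) : List Nat :=
  if h : n = 0 then [] else dBE (n / 10) ++ [n % 10]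
decreasing_by exact Nat.div_lt_self (Nat.pos_of_ne_zero h) (by norm_num)

theorem dBE_zero : dBE 0 = [] := by rw [dBE]; rfl
theorem dBE_pos {n : Nat} (h : n ≠ 0) : dBE n = dBE (n / 10) ++ [n % 10] := by
  conv_lhs => rw [dBE]
  simp [h]

-- left-zero-padded big-endian digits of t (k digits)
def padBE (k : Nat) (t : Nat) : List Nat :=
  match k with
  | 0 => []
  | k + 1 => padBE k (t / 10) ++ [t % 10]

-- the alternating-parity check starting after front position p
def okL (ds : List Nat) (p : Nat) : Bool :=
  match ds with
  | [] => true
  | d :: ds => (d % 2 == (p + 1) % 2) && okL ds (p + 1)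

def beautB (n : Nat) : Bool := (n != 0) && okL (dBE n) 0

-- number of beautiful numbers below y
def cnt (y : Nat) : Nat := (List.range y).countP beautB

theorem digits_lt_dBE : ∀ n, ∀ d ∈ dBE n, d < 10 := by
  intro n
  induction n using Nat.strong_induction_on with
  | _ n ih =>
    by_cases h : n = 0
    · simp [h, dBE_zero]
    · rw [dBE_pos h]
      intro d hd
      rcases List.mem_append.1 hd with h1 | h1
      · exact ih (n / 10) (Nat.div_lt_self (Nat.pos_of_ne_zero h) (by norm_num)) d h1
      · simp at h1; omega

theorem dBE_eq_nil_iff {n : Nat} : dBE n = [] ↔ n = 0 := by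
  constructor
  · intro h
    by_contra hn
    rw [dBE_pos hn] at h
    simp at h
  · rintro rfl; exact dBE_zero

theorem dBE_lt_pow (n : Nat) : n < 10 ^ (dBE n).length := by
  induction n using Nat.strong_induction_on with
  | _ n ih =>
    by_cases h : n = 0
    · simp [h, dBE_zero]
    · rw [dBE_pos h]
      have := ih (n / 10) (Nat.div_lt_self (Nat.pos_of_ne_zero h) (by norm_num))
      simp only [List.length_append, List.length_cons, List.length_nil]
      rw [pow_succ]
      omega

theorem pow_le_dBE (n : Nat) (h : n ≠ 0) : 10 ^ ((dBE n).length - 1) ≤ n := by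
  induction n using Nat.strong_induction_on with
  | _ n ih =>
    rw [dBE_pos h]
    simp only [List.length_append, List.length_cons, List.length_nil]
    by_cases h10 : n < 10
    · have : n / 10 = 0 := by omega
      rw [this, dBE_zero]
      simpa using Nat.pos_of_ne_zero h
    · have hq : n / 10 ≠ 0 := by omega
      have := ih (n / 10) (Nat.div_lt_self (Nat.pos_of_ne_zero h) (by norm_num)) hq
      have hlen : (dBE (n / 10)).length ≠ 0 := by
        simpa [List.length_eq_zero_iff] using fun hh => hq (dBE_eq_nil_iff.1 hh)
      have h1 : (dBE (n / 10)).length + 1 - 1 = ((dBE (n / 10)).length - 1) + 1 := by omega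
      rw [h1, pow_succ]
      omega

theorem dBE_length_eq {n k : Nat} (h1 : 10 ^ k ≤ n) (h2 : n < 10 ^ (k + 1)) :
    (dBE n).length = k + 1 := by
  have hn : n ≠ 0 := by have := Nat.one_le_pow k 10 (by norm_num); omega
  have hub := dBE_lt_pow n
  have hlb := pow_le_dBE n hn
  have c1 : k < (dBE n).length := by
    by_contra hc
    have : 10 ^ (dBE n).length ≤ 10 ^ k := Nat.pow_le_pow_right (by norm_num) (by omega)
    omega
  have c2 : (dBE n).length - 1 < k + 1 := by
    by_contra hc
    have : 10 ^ (k + 1) ≤ 10 ^ ((dBE n).length - 1) := Nat.pow_le_pow_right (by norm_num) (by omega)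
    omega
  omega

theorem dBE_split : ∀ (k P t : Nat), 1 ≤ P → t < 10 ^ k →
    dBE (P * 10 ^ k + t) = dBE P ++ padBE k t := by
  intro k
  induction k with
  | zero =>
    intro P t hP ht
    have : t = 0 := by omega
    simp [this, padBE]
  | succ k ih =>
    intro P t hP ht
    have hne : P * 10 ^ (k + 1) + t ≠ 0 := by positivity
    rw [dBE_pos hne]
    have hdiv : (P * 10 ^ (k + 1) + t) / 10 = P * 10 ^ k + t / 10 := by
      rw [pow_succ]
      rw [show P * (10 ^ k * 10) + t = (P * 10 ^ k) * 10 + t by ring]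
      omega
    have hmod : (P * 10 ^ (k + 1) + t) % 10 = t % 10 := by
      rw [pow_succ]
      rw [show P * (10 ^ k * 10) + t = (P * 10 ^ k) * 10 + t by ring]
      omega
    rw [hdiv, hmod, ih P (t / 10) hP (by rw [pow_succ] at ht; omega)]
    simp [padBE]

theorem length_padBE : ∀ k t, (padBE k t).length = k := by
  intro k
  induction k with
  | zero => intro t; rfl
  | succ k ih => intro t; simp [padBE, ih]

theorem padBE_eq : ∀ (k t : Nat), t < 10 ^ k →
    padBE k t = List.replicate (k - (dBE t).length) 0 ++ dBE t := by
  intro k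
  induction k with
  | zero =>
    intro t ht
    have : t = 0 := by omega
    simp [this, padBE, dBE_zero]
  | succ k ih =>
    intro t ht
    by_cases h : t = 0
    · subst h
      have h0 : padBE (k+1) 0 = padBE k 0 ++ [0] := by simp [padBE]
      rw [h0, ih 0 (by positivity)]
      simp [dBE_zero, List.replicate_succ']
    · have hq : t / 10 < 10 ^ k := by rw [pow_succ] at ht; omega
      have : padBE (k+1) t = padBE k (t / 10) ++ [t % 10] := by simp [padBE]
      rw [this, ih _ hq, dBE_pos h]
      simp only [List.length_append, List.length_cons, List.length_nil]
      have : k + 1 - ((dBE (t/10)).length + 1) = k - (dBE (t/10)).length := by omega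
      rw [this, List.append_assoc]

theorem okL_append : ∀ (xs ys : List Nat) (p : Nat),
    okL (xs ++ ys) p = (okL xs p && okL ys (p + xs.length)) := by
  intro xs
  induction xs with
  | nil => intro ys p; simp [okL]
  | cons d tl ih =>
    intro ys p
    simp only [List.cons_append, okL, ih]
    simp only [List.length_cons, Bool.and_assoc]
    have : p + (tl.length + 1) = p + 1 + tl.length := by omega
    rw [this]

theorem countP_and_const (l : List Nat) (q : Nat → Bool) (c : Bool) :
    l.countP (fun x => q x && c) = if c then l.countP q else 0 := by
  cases c <;> simp

theorem countP_const_and (l : List Nat) (q : Nat → Bool) (c : Bool) :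
    l.countP (fun x => c && q x) = if c then l.countP q else 0 := by
  cases c <;> simp

theorem countP_range_succ (M : Nat) (r : Nat → Bool) :
    (List.range (M + 1)).countP r = (List.range M).countP r + (if r M then 1 else 0) := by
  rw [List.range_succ, List.countP_append]
  simp [List.countP_cons]

-- divmod block decomposition of a count over range (10 * M)
theorem countP_range_mul10 (M : Nat) (q r : Nat → Bool) :
    (List.range (10 * M)).countP (fun t => q (t % 10) && r (t / 10)) =
      (List.range 10).countP q * (List.range M).countP r := by
  induction M with
  | zero => simp
  | succ M ih =>
    have h : 10 * (M + 1) = 10 * M + 10 := by ring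
    rw [h, List.range_add, List.countP_append, ih, List.countP_map]
    have hcong : (List.range 10).countP ((fun t => q (t % 10) && r (t / 10)) ∘ (fun x => 10 * M + x)) =
        (List.range 10).countP (fun x => q x && r M) := by
      apply List.countP_congr
      intro x hx
      have hx10 : x < 10 := List.mem_range.1 hx
      have h1 : (10 * M + x) % 10 = x := by omega
      have h2 : (10 * M + x) / 10 = M := by omega
      simp [Function.comp, h1, h2]
    rw [hcong, countP_and_const, countP_range_succ M r]
    cases hrM : r M <;> simp [hrM] <;> ring

theorem countP_padBE (k : Nat) : ∀ p,
    (List.range (10 ^ k)).countP (fun t => okL (padBE k t) p) = 5 ^ k := by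
  induction k with
  | zero => intro p; simp [padBE, okL]
  | succ k ih =>
    intro p
    have hsh : ∀ t : Nat, okL (padBE (k + 1) t) p =
        (((t % 10) % 2 == (p + k + 1) % 2) && okL (padBE k (t / 10)) p) := by
      intro t
      show okL (padBE k (t / 10) ++ [t % 10]) p = _
      rw [okL_append, length_padBE]
      simp only [okL, Bool.and_true]
      rw [Bool.and_comm]
    have h10 : (10:Nat) ^ (k + 1) = 10 * 10 ^ k := by ring
    rw [h10]
    have hc : (List.range (10 * 10 ^ k)).countP (fun t => okL (padBE (k + 1) t) p) =
        (List.range (10 * 10 ^ k)).countP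
          (fun t => ((t % 10) % 2 == (p + k + 1) % 2) && okL (padBE k (t / 10)) p) := by
      apply List.countP_congr
      intro t _
      rw [hsh t]
    rw [hc,
      countP_range_mul10 (10 ^ k) (fun x => x % 2 == (p + k + 1) % 2) (fun s => okL (padBE k s) p),
      ih p]
    obtain h | h : (p + k + 1) % 2 = 0 ∨ (p + k + 1) % 2 = 1 := by omega
    · have h5 : (List.range 10).countP (fun x => x % 2 == 0) = 5 := by decide
      rw [h, h5]; ring
    · have h5 : (List.range 10).countP (fun x => x % 2 == 1) = 5 := by decide
      rw [h, h5]; ring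

theorem beautB_block {P : Nat} (k t : Nat) (hP : 1 ≤ P) (ht : t < 10 ^ k) :
    beautB (P * 10 ^ k + t) = (okL (dBE P) 0 && okL (padBE k t) (dBE P).length) := by
  have hne : P * 10 ^ k + t ≠ 0 := by positivity
  unfold beautB
  rw [dBE_split k P t hP ht, okL_append]
  have hb : (P * 10 ^ k + t != 0) = true := by simp; omega
  rw [hb, Bool.true_and, Nat.zero_add]

-- count of beautiful numbers in one aligned block
theorem countP_block (k P : Nat) (hP : 1 ≤ P) :
    (List.range (10 ^ k)).countP (fun t => beautB (P * 10 ^ k + t)) =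
      if okL (dBE P) 0 then 5 ^ k else 0 := by
  have hc : (List.range (10 ^ k)).countP (fun t => beautB (P * 10 ^ k + t)) =
      (List.range (10 ^ k)).countP (fun t => okL (dBE P) 0 && okL (padBE k t) (dBE P).length) := by
    apply List.countP_congr
    intro t ht
    rw [beautB_block k t hP (List.mem_range.1 ht)]
  rw [hc, countP_const_and]
  split
  · exact countP_padBE k (dBE P).length
  · rfl

theorem cnt_add (a m : Nat) :
    cnt (a + m) = cnt a + (List.range m).countP (fun t => beautB (a + t)) := by
  unfold cnt
  rw [List.range_add, List.countP_append, List.countP_map]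
  rfl

-- a block whose prefix already fails contributes nothing, even truncated
theorem countP_block_zero (k P m : Nat) (hP : 1 ≤ P) (hok : okL (dBE P) 0 = false)
    (hm : m ≤ 10 ^ k) :
    (List.range m).countP (fun t => beautB (P * 10 ^ k + t)) = 0 := by
  rw [List.countP_eq_zero]
  intro t ht
  have htk : t < 10 ^ k := lt_of_lt_of_le (List.mem_range.1 ht) hm
  rw [beautB_block k t hP htk, hok]
  simp

-- the top decade [10^k, 10^(k+1)) contains 5^(k+1) beautiful numbers
theorem countP_decade (k : Nat) :
    (List.range (9 * 10 ^ k)).countP (fun t => beautB (10 ^ k + t)) = 5 ^ (k + 1) := by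
  have hsplit : (10:Nat) ^ (k + 1) = 10 ^ k + 9 * 10 ^ k := by ring
  have hfull := countP_padBE (k + 1) 0
  rw [hsplit, List.range_add, List.countP_append, List.countP_map] at hfull
  have hlow : (List.range (10 ^ k)).countP (fun t => okL (padBE (k + 1) t) 0) = 0 := by
    rw [List.countP_eq_zero]
    intro t ht
    have htk : t < 10 ^ k := List.mem_range.1 ht
    have hlen : (dBE t).length ≤ k := by
      by_contra hc
      have : 10 ^ k ≤ 10 ^ ((dBE t).length - 1) := Nat.pow_le_pow_right (by norm_num) (by omega)
      have := pow_le_dBE t (by rintro rfl; simp [dBE_zero] at hc)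
      omega
    rw [padBE_eq (k + 1) t (lt_of_lt_of_le htk (by rw [hsplit]; omega))]
    have h1 : k + 1 - (dBE t).length = (k - (dBE t).length) + 1 := by omega
    rw [h1, List.replicate_succ]
    simp [okL]
  have hup : (List.range (9 * 10 ^ k)).countP ((fun t => okL (padBE (k + 1) t) 0) ∘ (fun x => 10 ^ k + x)) =
      (List.range (9 * 10 ^ k)).countP (fun t => beautB (10 ^ k + t)) := by
    apply List.countP_congr
    intro t ht
    have htr : t < 9 * 10 ^ k := List.mem_range.1 ht
    have hb : 10 ^ k ≤ 10 ^ k + t := by omega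
    have hub : 10 ^ k + t < 10 ^ (k + 1) := by rw [hsplit]; omega
    have hlen : (dBE (10 ^ k + t)).length = k + 1 := dBE_length_eq hb hub
    have hne : 10 ^ k + t ≠ 0 := by positivity
    simp only [Function.comp]
    rw [padBE_eq (k + 1) (10 ^ k + t) hub, hlen]
    simp only [Function.comp, Nat.sub_self, List.replicate_zero, List.nil_append]
    unfold beautB
    simp [hne]
  rw [hup] at hfull
  omega

theorem cnt_pow_succ (k : Nat) : cnt (10 ^ (k + 1)) = cnt (10 ^ k) + 5 ^ (k + 1) := by
  have h : (10:Nat) ^ (k + 1) = 10 ^ k + 9 * 10 ^ k := by ring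
  rw [h, cnt_add, countP_decade]

theorem cnt_one : cnt 1 = 0 := by decide

-- sum of indicator blocks
theorem cnt_mul_step (Q w : Nat) (hQ : 1 ≤ Q) : ∀ c,
    cnt ((Q + c) * 10 ^ w) =
      cnt (Q * 10 ^ w) + ((List.range c).countP (fun x => okL (dBE (Q + x)) 0)) * 5 ^ w := by
  intro c
  induction c with
  | zero => simp
  | succ c ih =>
    have h1 : (Q + (c + 1)) * 10 ^ w = (Q + c) * 10 ^ w + 10 ^ w := by ring
    rw [h1, cnt_add, ih, countP_block w (Q + c) (by omega), countP_range_succ]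
    split <;> ring

theorem cnt_succ (n : Nat) : cnt (n + 1) = cnt n + (if beautB n then 1 else 0) := by
  unfold cnt
  rw [List.range_succ, List.countP_append]
  simp [List.countP_cons]

-- reconstruct the number from its digits
def valBE (ds : List Nat) : Nat := ds.foldl (fun a d => 10 * a + d) 0

theorem valBE_aux (ds : List Nat) : ∀ a, ds.foldl (fun a d => 10 * a + d) a =
    a * 10 ^ ds.length + ds.foldl (fun a d => 10 * a + d) 0 := by
  induction ds with
  | nil => intro a; simp
  | cons d tl ih =>
    intro a
    simp only [List.foldl_cons, List.length_cons]
    rw [ih (10 * a + d), show (10:Nat) * 0 + d = d from by ring, ih d]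
    ring

theorem valBE_dBE (n : Nat) : valBE (dBE n) = n := by
  induction n using Nat.strong_induction_on with
  | _ n ih =>
    by_cases h : n = 0
    · simp [h, dBE_zero, valBE]
    · rw [dBE_pos h]
      unfold valBE
      rw [List.foldl_append]
      simp only [List.foldl_cons, List.foldl_nil]
      have := ih (n / 10) (Nat.div_lt_self (Nat.pos_of_ne_zero h) (by norm_num))
      unfold valBE at this
      rw [this]
      omega

theorem dBE_inj {m n : Nat} (h : dBE m = dBE n) : m = n := by
  have := valBE_dBE m
  rw [h, valBE_dBE] at this
  omega

theorem valBE_lt (ds : List Nat) (h : ∀ d ∈ ds, d < 10) : valBE ds < 10 ^ ds.length := by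
  induction ds with
  | nil => simp [valBE]
  | cons d tl ih =>
    have hd : d < 10 := h d (by simp)
    have htl := ih (fun x hx => h x (by simp [hx]))
    unfold valBE at *
    simp only [List.foldl_cons, List.length_cons]
    rw [show (10:Nat) * 0 + d = d from by ring, valBE_aux tl d]
    rw [pow_succ]
    nlinarith

-- n with digits dBE P ++ ds lies in [P * 10^|ds|, (P+1) * 10^|ds|)
theorem split_of_dBE_eq {n P : Nat} {ds : List Nat} (h : dBE n = dBE P ++ ds) :
    n = P * 10 ^ ds.length + valBE ds ∧ valBE ds < 10 ^ ds.length := by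
  have hd : ∀ d ∈ ds, d < 10 := by
    intro d hdm
    exact digits_lt_dBE n d (by rw [h]; exact List.mem_append.2 (Or.inr hdm))
  refine ⟨?_, valBE_lt ds hd⟩
  have hv := valBE_dBE n
  rw [h] at hv
  unfold valBE at hv
  rw [List.foldl_append] at hv
  rw [valBE_aux ds] at hv
  have hvP := valBE_dBE P
  unfold valBE at hvP
  rw [hvP] at hv
  unfold valBE
  omega

theorem dBE_single {d : Nat} (h1 : 1 ≤ d) (h2 : d < 10) : dBE d = [d] := by
  rw [dBE_pos (by omega)]
  have : d / 10 = 0 := by omega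
  rw [this, dBE_zero]
  have : d % 10 = d := by omega
  rw [this]
  rfl

theorem dBE_append_digit (P d : Nat) (hP : 1 ≤ P) (hd : d < 10) :
    dBE (P * 10 + d) = dBE P ++ [d] := by
  rw [dBE_pos (by positivity)]
  have h1 : (P * 10 + d) / 10 = P := by omega
  have h2 : (P * 10 + d) % 10 = d := by omega
  rw [h1, h2]

theorem dBE_head (n : Nat) (h : n ≠ 0) : ∃ d tl, dBE n = d :: tl ∧ 1 ≤ d ∧ d < 10 := by
  induction n using Nat.strong_induction_on with
  | _ n ih =>
    by_cases h10 : n < 10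
    · exact ⟨n, [], dBE_single (by omega) h10, by omega, h10⟩
    · have hq : n / 10 ≠ 0 := by omega
      obtain ⟨d, tl, htl, hd1, hd2⟩ := ih (n / 10) (Nat.div_lt_self (Nat.pos_of_ne_zero h) (by norm_num)) hq
      exact ⟨d, tl ++ [n % 10], by rw [dBE_pos h, htl]; rfl, hd1, hd2⟩

theorem padBE_zero_eq_replicate (k : Nat) : padBE k 0 = List.replicate k 0 := by
  induction k with
  | zero => rfl
  | succ k ih => simp [padBE, ih, List.replicate_succ']

theorem toDigitsCore_eq : ∀ (f n : Nat) (ds : List Char), n < f →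
    Nat.toDigitsCore 10 f n ds = (if n = 0 then ['0'] else (dBE n).map Nat.digitChar) ++ ds := by
  intro f
  induction f with
  | zero => intro n ds h; omega
  | succ f ih =>
    intro n ds h
    show Nat.toDigitsCore 10 (f + 1) n ds = _
    rw [Nat.toDigitsCore]
    by_cases h0 : n = 0
    · subst h0
      norm_num
      rfl
    · by_cases hq : n / 10 = 0
      · simp only [hq, if_true]
        rw [dBE_pos h0, hq, dBE_zero]
        simp [h0]
      · simp only [hq, if_false]
        rw [ih (n / 10) _ (by omega)]
        rw [dBE_pos h0]
        simp [h0, hq]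

theorem toChars_natCast (n : Nat) :
    PySem.Int.toChars (n : Int) = (if n = 0 then ['0'] else (dBE n).map Nat.digitChar) := by
  unfold PySem.Int.toChars
  rw [if_neg (by omega)]
  show Nat.toDigits 10 (Int.toNat n) = _
  rw [Int.toNat_natCast]
  unfold Nat.toDigits
  rw [toDigitsCore_eq (n + 1) n [] (by omega), List.append_nil]

theorem digitInt_digitChar (d : Nat) (h : d < 10) : digitInt (Nat.digitChar d) = (d : Int) := by
  interval_cases d <;> rfl

theorem digitIntB_digitChar (d : Nat) (h : d < 10) : digitIntB (Nat.digitChar d) = (d : Int) := by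
  interval_cases d <;> rfl

theorem digitLoopA_cons (c : Char) (cs : List Char) (i stop : Int) (b : Bool) :
    digitLoopA (c :: cs) i stop b =
      (if i + 1 > stop then (if PySem.Int.mod i 2 ≠ PySem.Int.mod (digitInt c) 2 then false else b)
       else digitLoopA cs (i + 1) stop
         (if PySem.Int.mod i 2 ≠ PySem.Int.mod (digitInt c) 2 then false else b)) := rfl

-- the inner digit loop over the first ds.length characters computes okL
theorem digitLoopA_ok : ∀ (ds : List Nat) (p : Nat) (b : Bool) (rest : List Char),
    ds ≠ [] → (∀ d ∈ ds, d < 10) →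
    digitLoopA (ds.map Nat.digitChar ++ rest) ((p : Int) + 1) ((p : Int) + ds.length) b =
      (b && okL ds p) := by
  intro ds
  induction ds with
  | nil => intro p b rest h; exact absurd rfl h
  | cons d tl ih =>
    intro p b rest _ hd
    have hd10 : d < 10 := hd d (by simp)
    have hstep : (if PySem.Int.mod ((p : Int) + 1) 2 ≠ PySem.Int.mod (digitInt (Nat.digitChar d)) 2
        then false else b) = (b && (d % 2 == (p + 1) % 2)) := by
      have hmodi : PySem.Int.mod ((p : Int) + 1) 2 = (((p + 1) % 2 : Nat) : Int) := by
        rw [show ((p : Int) + 1) = ((p + 1 : Nat) : Int) by push_cast; ring]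
        exact PySem.Int.mod_natCast (p + 1) 2
      have hmodd : PySem.Int.mod (digitInt (Nat.digitChar d)) 2 = ((d % 2 : Nat) : Int) := by
        rw [digitInt_digitChar d hd10]
        exact PySem.Int.mod_natCast d 2
      rw [hmodi, hmodd]
      by_cases hc : d % 2 = (p + 1) % 2
      · rw [if_neg (by simp [hc])]
        simp [hc]
      · rw [if_pos (by simp; omega)]
        simp [hc]
    show digitLoopA (Nat.digitChar d :: (tl.map Nat.digitChar ++ rest)) _ _ b = _
    rw [digitLoopA_cons, hstep]
    cases tl with
    | nil =>
      rw [if_pos (by simp)]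
      simp [okL]
    | cons d2 tl2 =>
      rw [if_neg (by simp only [List.length_cons]; push_cast; omega)]
      have harg : ((p : Int) + 1) + 1 = ((p + 1 : Nat) : Int) + 1 := by push_cast; ring
      have hstop : (p : Int) + ((d :: d2 :: tl2).length : Nat) =
          ((p + 1 : Nat) : Int) + ((d2 :: tl2).length : Nat) := by
        simp only [List.length_cons]; push_cast; ring
      rw [harg, hstop, ih (p + 1) _ _ (by simp) (fun x hx => hd x (by simp [hx]))]
      simp [okL, Bool.and_assoc]

theorem checkA_full (n : Nat) (hn : 1 ≤ n) : checkA (n : Int) 0 = okL (dBE n) 0 := by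
  unfold checkA
  rw [toChars_natCast n, if_neg (by omega)]
  have hne : dBE n ≠ [] := fun h => by simp [dBE_eq_nil_iff.1 h] at hn
  have h1 : ((dBE n).map Nat.digitChar) = (dBE n).map Nat.digitChar ++ [] := by simp
  rw [PySem.List.len_eq, List.length_map]
  have h2 : (1 : Int) = ((0 : Nat) : Int) + 1 := by norm_num
  have h3 : (((dBE n).length : Nat) : Int) - 0 = ((0 : Nat) : Int) + ((dBE n).length : Nat) := by
    push_cast; ring
  rw [h1, h2, h3, digitLoopA_ok (dBE n) 0 true [] hne (digits_lt_dBE n)]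
  simp

theorem checkA_chunk (P k : Nat) (hP : 1 ≤ P) : checkA ((P * 10 ^ k : Nat) : Int) (k : Int) = okL (dBE P) 0 := by
  unfold checkA
  have hsp : dBE (P * 10 ^ k) = dBE P ++ List.replicate k 0 := by
    rw [show P * 10 ^ k = P * 10 ^ k + 0 by ring, dBE_split k P 0 hP (by positivity),
      padBE_zero_eq_replicate]
  rw [toChars_natCast _, if_neg (by positivity), hsp, List.map_append]
  have hne : dBE P ≠ [] := fun h => by simp [dBE_eq_nil_iff.1 h] at hP
  rw [PySem.List.len_eq]
  simp only [List.length_append, List.length_map, List.length_replicate]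
  have h2 : (1 : Int) = ((0 : Nat) : Int) + 1 := by norm_num
  have h3 : ((((dBE P).length + k : Nat)) : Int) - (k : Int) = ((0 : Nat) : Int) + ((dBE P).length : Nat) := by
    push_cast; ring
  rw [h2, h3, digitLoopA_ok (dBE P) 0 true _ hne (fun d hd => digits_lt_dBE P d hd)]
  simp

theorem checkA_pow (k : Nat) (l : Int) (hl : (1 + k : Int) - l ≤ 1) :
    checkA ((10 ^ k : Nat) : Int) l = true := by
  unfold checkA
  have hsp : dBE (10 ^ k) = 1 :: List.replicate k 0 := by
    rw [show (10:Nat) ^ k = 1 * 10 ^ k + 0 by ring, dBE_split k 1 0 (by norm_num) (by positivity),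
      padBE_zero_eq_replicate, dBE_single (by norm_num) (by norm_num)]
    rfl
  rw [toChars_natCast _, if_neg (by positivity), hsp]
  rw [PySem.List.len_eq]
  simp only [List.map_cons, List.length_cons, List.length_map, List.length_replicate]
  rw [digitLoopA_cons]
  rw [if_pos (by push_cast; omega)]
  rw [if_neg (by decide)]

theorem procAllA_append (xs ys : List (Int × Int × Int)) (ab : Int × Bool) :
    procAllA (xs ++ ys) ab = procAllA ys (procAllA xs ab) := by
  unfold procAllA
  exact List.foldl_append

theorem procIntervalA_chunk (a : Int) (b0 : Bool) (s e l : Int) (hl : l ≠ 0) :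
    procIntervalA (a, b0) (s, e, l) =
      (a + (if checkA s l then pwA 5 l else 0), checkA s l) := by
  unfold procIntervalA
  simp only [if_pos hl]
  rw [PySem.List.pyRange_one_singleton]
  simp only [List.foldl_cons, List.foldl_nil]
  have h0 : (l == 0) = false := by simp [hl]
  rw [h0]
  simp only [Bool.and_false, Bool.not_false, Bool.and_true]
  cases hc : checkA s l <;> simp [hc]

theorem foldl_cnt (g : Int → Bool) : ∀ (xs : List Int) (a : Int) (b : Bool),
    (xs.foldl (fun (ab : Int × Bool) n => (if g n then ab.1 + 1 else ab.1, g n)) (a, b)).1 =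
      a + (xs.countP g : Nat) := by
  intro xs
  induction xs with
  | nil => intro a b; simp
  | cons x tl ih =>
    intro a b
    simp only [List.foldl_cons]
    rw [ih (if g x then a + 1 else a) (g x), List.countP_cons]
    cases hc : g x <;> simp [hc] <;> push_cast <;> ring

theorem procIntervalA_tail (a : Int) (b0 : Bool) (s e : Int) :
    (procIntervalA (a, b0) (s, e, 0)).1 =
      a + ((PySem.List.pyRange s (e + 1) 1).countP (fun n => checkA n 0) : Nat) := by
  unfold procIntervalA
  simp only [ne_eq, not_true_eq_false, reduceIte, beq_self_eq_true, Bool.not_true, Bool.and_true,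
    Bool.and_false, Bool.false_eq_true, if_false]
  rw [foldl_cnt (fun n => checkA n 0)]

theorem beautB_pos (n : Nat) (h : n ≠ 0) : beautB n = okL (dBE n) 0 := by
  unfold beautB
  simp [h]

theorem countP_pyRange_beaut (a m : Nat) (ha : 1 ≤ a) :
    ((PySem.List.pyRange (a : Int) ((a : Int) + (m : Int)) 1).countP (fun n => checkA n 0)) =
      (List.range m).countP (fun t => beautB (a + t)) := by
  rw [PySem.List.pyRange_one, List.countP_map]
  have hm : ((a : Int) + (m : Int) - (a : Int)).toNat = m := by omega
  rw [hm]
  apply List.countP_congr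
  intro k _
  have h1 : ((a : Int) + (k : Int)) = ((a + k : Nat) : Int) := by push_cast; ring
  simp only [Function.comp, h1]
  rw [checkA_full (a + k) (by omega), beautB_pos (a + k) (by omega)]

theorem pwA_toNat (b : Int) (l : Int) (hb : 0 ≤ b) : pwA b l = ((b.toNat ^ l.toNat : Nat) : Int) := by
  unfold pwA
  push_cast [Int.toNat_of_nonneg hb]
  try rfl

theorem procIntervalA_chunk_fst (ab : Int × Bool) (s e l : Int) (hl : l ≠ 0) :
    (procIntervalA ab (s, e, l)).1 = ab.1 + (if checkA s l then pwA 5 l else 0) := by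
  rw [show ab = (ab.1, ab.2) from rfl, procIntervalA_chunk _ _ _ _ _ hl]

theorem procIntervalA_tail_fst (ab : Int × Bool) (s e : Int) :
    (procIntervalA ab (s, e, 0)).1 =
      ab.1 + ((PySem.List.pyRange s (e + 1) 1).countP (fun n => checkA n 0) : Nat) := by
  rw [show ab = (ab.1, ab.2) from rfl, procIntervalA_tail]

theorem procAllA_snoc_fst (acc : List (Int × Int × Int)) (iv : Int × Int × Int) (ab : Int × Bool) :
    procAllA (acc ++ [iv]) ab = procIntervalA (procAllA acc ab) iv := by
  rw [procAllA_append]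
  rfl

theorem loop1A_spec (X : Int) : ∀ (l last : Int) (acc : List (Int × Int × Int)),
    1 ≤ l → 0 ≤ last → last.toNat + 1 = 10 ^ (l.toNat - 1) →
    (∀ ab : Int × Bool, (procAllA (loop1A X l last acc).1 ab).1
        = (procAllA acc ab).1 +
          ((cnt ((loop1A X l last acc).2.2.toNat + 1) : Int) - (cnt (last.toNat + 1) : Int)))
    ∧ 1 ≤ (loop1A X l last acc).2.1
    ∧ 0 ≤ (loop1A X l last acc).2.2
    ∧ (loop1A X l last acc).2.2.toNat + 1 = 10 ^ ((loop1A X l last acc).2.1.toNat - 1)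
    ∧ ¬(pwA 10 (loop1A X l last acc).2.1 - pwA 10 ((loop1A X l last acc).2.1 - 1)
          < X - (loop1A X l last acc).2.2)
    ∧ ((loop1A X l last acc).2.2 = last ∨ (loop1A X l last acc).2.2 < X) := by
  intro l last acc
  fun_induction loop1A X l last acc with
  | case1 l last acc h ih =>
    intro hl hlast0 hlast
    have hn1 : 1 ≤ l.toNat := by omega
    have hpow10 : (10:Nat) ^ l.toNat = 10 * 10 ^ (l.toNat - 1) := by
      rw [← pow_succ']
      congr 1
      omega
    have hpl : pwA 10 l = ((10 ^ l.toNat : Nat) : Int) := by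
      rw [pwA_toNat 10 l (by norm_num)]; norm_num
    have hpl1 : pwA 10 (l - 1) = ((10 ^ (l.toNat - 1) : Nat) : Int) := by
      rw [pwA_toNat 10 (l - 1) (by norm_num)]
      norm_num
      try (congr 1; omega)
    have hstep : pwA 10 l - pwA 10 (l - 1) = ((9 * 10 ^ (l.toNat - 1) : Nat) : Int) := by
      rw [hpl, hpl1, hpow10]
      push_cast
      ring
    have hstep0 : (0:Int) ≤ pwA 10 l - pwA 10 (l - 1) := by rw [hstep]; positivity
    have hlast0' : 0 ≤ last + (pwA 10 l - pwA 10 (l - 1)) := by omega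
    have htoNat' : (last + (pwA 10 l - pwA 10 (l - 1))).toNat + 1 = 10 ^ ((l + 1).toNat - 1) := by
      have h1 : ((l + 1).toNat - 1) = l.toNat := by omega
      rw [h1, hstep, hpow10]
      omega
    obtain ⟨ihsum, ih1, ih2, ih3, ih4, ih5⟩ := ih (by omega) hlast0' htoNat'
    refine ⟨?_, ih1, ih2, ih3, ih4, ?_⟩
    · intro ab
      rw [ihsum ab, procAllA_snoc_fst, procIntervalA_chunk_fst _ _ _ _ (by omega)]
      have hs : last + 1 = ((10 ^ (l.toNat - 1) : Nat) : Int) := by omega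
      have hck : checkA (last + 1) l = true := by
        rw [hs]
        exact checkA_pow (l.toNat - 1) l (by push_cast; omega)
      rw [hck, if_pos rfl]
      have hp5 : pwA 5 l = ((5 ^ l.toNat : Nat) : Int) := by
        rw [pwA_toNat 5 l (by norm_num)]; norm_num
      have hcnt : cnt ((last + (pwA 10 l - pwA 10 (l - 1))).toNat + 1)
          = cnt (last.toNat + 1) + 5 ^ l.toNat := by
        rw [htoNat', hlast]
        have := cnt_pow_succ (l.toNat - 1)
        rw [show l.toNat - 1 + 1 = l.toNat by omega] at this
        rw [show (l+1).toNat - 1 = l.toNat by omega]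
        exact this
      rw [hcnt, hp5]
      push_cast
      ring
    · rcases ih5 with h5 | h5
      · right
        omega
      · right
        exact h5
  | case2 l last acc h =>
    intro hl hlast0 hlast
    exact ⟨fun ab => by simp, hl, hlast0, hlast, h, Or.inl rfl⟩

theorem loop2RA_spec (R : Int) : ∀ (l last : Int) (acc : List (Int × Int × Int)),
    1 ≤ l → 0 ≤ last → 10 ^ (l.toNat - 1) ∣ (last.toNat + 1) → 10 ^ (l.toNat - 1) ≤ last.toNat + 1 →
    ∀ ab : Int × Bool, (procAllA (loop2RA R l last acc) ab).1
      = (procAllA acc ab).1 +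
        ((cnt ((max R last).toNat + 1) : Int) - (cnt (last.toNat + 1) : Int)) := by
  intro l last acc
  fun_induction loop2RA R l last acc with
  | case1 l last acc hw h1 =>
    intro hl hl0 hdvd hle ab
    rw [procAllA_snoc_fst, procIntervalA_tail_fst]
    have ha : (last + 1 : Int) = ((last.toNat + 1 : Nat) : Int) := by omega
    have hb : (R + 1 : Int) = ((last.toNat + 1 : Nat) : Int) + (((R - last).toNat : Nat) : Int) := by
      omega
    rw [ha, hb, countP_pyRange_beaut (last.toNat + 1) (R - last).toNat (by omega)]
    have hcnt := cnt_add (last.toNat + 1) (R - last).toNat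
    have hmax : max R last = R := max_eq_left hw.le
    rw [hmax]
    have hRn : last.toNat + 1 + (R - last).toNat = R.toNat + 1 := by omega
    rw [hRn] at hcnt
    omega
  | case2 l last acc hw h1 h2 ih =>
    intro hl hl0 hdvd hle ab
    have hk : pwA 10 (l - 1) = ((10 ^ (l.toNat - 1) : Nat) : Int) := by
      rw [pwA_toNat 10 (l - 1) (by norm_num)]
      norm_num
      try (congr 1; omega)
    set k := l.toNat - 1 with hkdef
    obtain ⟨P, hPe⟩ := hdvd
    rw [Nat.mul_comm] at hPe
    have hP1 : 1 ≤ P := by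
      rcases Nat.eq_zero_or_pos P with h | h
      · rw [h] at hPe; omega
      · exact h
    have hpw0 : (0:Int) < pwA 10 (l - 1) := by rw [hk]; positivity
    have hlast0' : 0 ≤ last + pwA 10 (l - 1) := by omega
    have htn' : (last + pwA 10 (l - 1)).toNat + 1 = (P + 1) * 10 ^ k := by
      rw [hk]
      have hx : (last + ((10 ^ k : Nat) : Int)).toNat = last.toNat + 10 ^ k := by omega
      rw [hx]
      have hm : (P + 1) * 10 ^ k = P * 10 ^ k + 10 ^ k := by ring
      omega
    have hdvd' : 10 ^ (l.toNat - 1) ∣ ((last + pwA 10 (l - 1)).toNat + 1) := by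
      rw [htn']
      exact Dvd.intro_left _ rfl
    have hle' : 10 ^ (l.toNat - 1) ≤ (last + pwA 10 (l - 1)).toNat + 1 := by
      rw [htn']
      have := Nat.le_mul_of_pos_left (10 ^ k) (show 0 < P + 1 by omega)
      exact this
    have hlt' : last + pwA 10 (l - 1) < R := by omega
    rw [ih hl hlast0' hdvd' hle' ab, procAllA_snoc_fst]
    have hval : (procIntervalA (procAllA acc ab) (last + 1, last + pwA 10 (l - 1), l - 1)).1
        = (procAllA acc ab).1 +
          (((List.range (10 ^ k)).countP (fun t => beautB ((last.toNat + 1) + t)) : Nat) : Int) := by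
      have hcong : (List.range (10 ^ k)).countP (fun t => beautB ((last.toNat + 1) + t))
          = (List.range (10 ^ k)).countP (fun t => beautB (P * 10 ^ k + t)) := by
        apply List.countP_congr
        intro t _
        rw [hPe]
      by_cases hl2 : 2 ≤ l
      · rw [procIntervalA_chunk_fst _ _ _ _ (by omega)]
        have hs : (last + 1 : Int) = (((P * 10 ^ k : Nat)) : Int) := by omega
        have hlk : (l - 1 : Int) = ((k : Nat) : Int) := by omega
        rw [hs, hlk, checkA_chunk P k hP1, hcong, countP_block k P hP1]
        have hp5 : pwA 5 ((k : Nat) : Int) = ((5 ^ k : Nat) : Int) := by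
          rw [pwA_toNat 5 _ (by norm_num)]
          norm_num
        cases hok : okL (dBE P) 0 <;> simp [hok, hp5]
      · have hk0 : k = 0 := by omega
        have hzero : (l - 1 : Int) = 0 := by omega
        rw [hzero, procIntervalA_tail_fst]
        have hpw1 : pwA 10 (0 : Int) = 1 := rfl
        have ha : (last + 1 : Int) = ((last.toNat + 1 : Nat) : Int) := by omega
        have hb : (last + pwA 10 0 + 1 : Int)
            = ((last.toNat + 1 : Nat) : Int) + ((1 : Nat) : Int) := by
          rw [hpw1]
          push_cast
          omega
        rw [ha, hb, countP_pyRange_beaut (last.toNat + 1) 1 (by omega), hk0]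
        norm_num
    rw [hval]
    have hcnt := cnt_add (last.toNat + 1) (10 ^ k)
    have hsum : last.toNat + 1 + 10 ^ k = (last + pwA 10 (l - 1)).toNat + 1 := by
      rw [htn']
      have hm : (P + 1) * 10 ^ k = P * 10 ^ k + 10 ^ k := by ring
      omega
    rw [hsum] at hcnt
    have hmax1 : max R (last + pwA 10 (l - 1)) = R := max_eq_left hlt'.le
    have hmax2 : max R last = R := max_eq_left hw.le
    rw [hmax1, hmax2]
    omega
  | case3 l last acc hw h1 h2 ih =>
    intro hl hl0 hdvd hle ab
    have hk : pwA 10 (l - 1) = ((10 ^ (l.toNat - 1) : Nat) : Int) := by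
      rw [pwA_toNat 10 (l - 1) (by norm_num)]
      norm_num
      try (congr 1; omega)
    have hl2 : 2 ≤ l := by
      by_contra hc
      have h01 : l.toNat - 1 = 0 := by omega
      rw [hk, h01] at h2
      norm_num at h2
      omega
    have hdvd' : 10 ^ ((l - 1).toNat - 1) ∣ (last.toNat + 1) :=
      dvd_trans (pow_dvd_pow 10 (by omega)) hdvd
    have hle' : 10 ^ ((l - 1).toNat - 1) ≤ last.toNat + 1 :=
      le_trans (Nat.pow_le_pow_right (by norm_num) (by omega)) hle
    exact ih (by omega) hl0 hdvd' hle' ab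
  | case4 l last acc hw =>
    intro hl hl0 hdvd hle ab
    have hmax : max R last = last := max_eq_right (by omega)
    rw [hmax]
    omega

theorem loop2LA_spec (L : Int) : ∀ (l last : Int) (acc : List (Int × Int × Int)),
    1 ≤ l → 0 ≤ last → 10 ^ (l.toNat - 1) ∣ (last.toNat + 1) → 10 ^ (l.toNat - 1) ≤ last.toNat + 1 →
    ∀ ab : Int × Bool, (procAllA (loop2LA L l last acc) ab).1
      = (procAllA acc ab).1 +
        ((cnt ((max (L - 1) last).toNat + 1) : Int) - (cnt (last.toNat + 1) : Int)) := by
  intro l last acc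
  fun_induction loop2LA L l last acc with
  | case1 l last acc hw h1 =>
    intro hl hl0 hdvd hle ab
    rw [procAllA_snoc_fst, procIntervalA_tail_fst]
    have ha : (last + 1 : Int) = ((last.toNat + 1 : Nat) : Int) := by omega
    have hb : (L - 1 + 1 : Int) = ((last.toNat + 1 : Nat) : Int) + (((L - 1 - last).toNat : Nat) : Int) := by
      omega
    rw [ha, hb, countP_pyRange_beaut (last.toNat + 1) (L - 1 - last).toNat (by omega)]
    have hcnt := cnt_add (last.toNat + 1) (L - 1 - last).toNat
    have hmax : max (L - 1) last = L - 1 := max_eq_left hw.le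
    rw [hmax]
    have hRn : last.toNat + 1 + (L - 1 - last).toNat = (L - 1).toNat + 1 := by omega
    rw [hRn] at hcnt
    omega
  | case2 l last acc hw h1 h2 ih =>
    intro hl hl0 hdvd hle ab
    have hk : pwA 10 (l - 1) = ((10 ^ (l.toNat - 1) : Nat) : Int) := by
      rw [pwA_toNat 10 (l - 1) (by norm_num)]
      norm_num
      try (congr 1; omega)
    set k := l.toNat - 1 with hkdef
    obtain ⟨P, hPe⟩ := hdvd
    rw [Nat.mul_comm] at hPe
    have hP1 : 1 ≤ P := by
      rcases Nat.eq_zero_or_pos P with h | h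
      · rw [h] at hPe; omega
      · exact h
    have hpw0 : (0:Int) < pwA 10 (l - 1) := by rw [hk]; positivity
    have hlast0' : 0 ≤ last + pwA 10 (l - 1) := by omega
    have htn' : (last + pwA 10 (l - 1)).toNat + 1 = (P + 1) * 10 ^ k := by
      rw [hk]
      have hx : (last + ((10 ^ k : Nat) : Int)).toNat = last.toNat + 10 ^ k := by omega
      rw [hx]
      have hm : (P + 1) * 10 ^ k = P * 10 ^ k + 10 ^ k := by ring
      omega
    have hdvd' : 10 ^ (l.toNat - 1) ∣ ((last + pwA 10 (l - 1)).toNat + 1) := by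
      rw [htn']
      exact Dvd.intro_left _ rfl
    have hle' : 10 ^ (l.toNat - 1) ≤ (last + pwA 10 (l - 1)).toNat + 1 := by
      rw [htn']
      have := Nat.le_mul_of_pos_left (10 ^ k) (show 0 < P + 1 by omega)
      exact this
    have hlt' : last + pwA 10 (l - 1) < L - 1 := by omega
    rw [ih hl hlast0' hdvd' hle' ab, procAllA_snoc_fst]
    have hval : (procIntervalA (procAllA acc ab) (last + 1, last + pwA 10 (l - 1), l - 1)).1
        = (procAllA acc ab).1 +
          (((List.range (10 ^ k)).countP (fun t => beautB ((last.toNat + 1) + t)) : Nat) : Int) := by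
      have hcong : (List.range (10 ^ k)).countP (fun t => beautB ((last.toNat + 1) + t))
          = (List.range (10 ^ k)).countP (fun t => beautB (P * 10 ^ k + t)) := by
        apply List.countP_congr
        intro t _
        rw [hPe]
      by_cases hl2 : 2 ≤ l
      · rw [procIntervalA_chunk_fst _ _ _ _ (by omega)]
        have hs : (last + 1 : Int) = (((P * 10 ^ k : Nat)) : Int) := by omega
        have hlk : (l - 1 : Int) = ((k : Nat) : Int) := by omega
        rw [hs, hlk, checkA_chunk P k hP1, hcong, countP_block k P hP1]
        have hp5 : pwA 5 ((k : Nat) : Int) = ((5 ^ k : Nat) : Int) := by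
          rw [pwA_toNat 5 _ (by norm_num)]
          norm_num
        cases hok : okL (dBE P) 0 <;> simp [hok, hp5]
      · have hk0 : k = 0 := by omega
        have hzero : (l - 1 : Int) = 0 := by omega
        rw [hzero, procIntervalA_tail_fst]
        have hpw1 : pwA 10 (0 : Int) = 1 := rfl
        have ha : (last + 1 : Int) = ((last.toNat + 1 : Nat) : Int) := by omega
        have hb : (last + pwA 10 0 + 1 : Int)
            = ((last.toNat + 1 : Nat) : Int) + ((1 : Nat) : Int) := by
          rw [hpw1]
          push_cast
          omega
        rw [ha, hb, countP_pyRange_beaut (last.toNat + 1) 1 (by omega), hk0]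
        norm_num
    rw [hval]
    have hcnt := cnt_add (last.toNat + 1) (10 ^ k)
    have hsum : last.toNat + 1 + 10 ^ k = (last + pwA 10 (l - 1)).toNat + 1 := by
      rw [htn']
      have hm : (P + 1) * 10 ^ k = P * 10 ^ k + 10 ^ k := by ring
      omega
    rw [hsum] at hcnt
    have hmax1 : max (L - 1) (last + pwA 10 (l - 1)) = L - 1 := max_eq_left hlt'.le
    have hmax2 : max (L - 1) last = L - 1 := max_eq_left hw.le
    rw [hmax1, hmax2]
    omega
  | case3 l last acc hw h1 h2 ih =>
    intro hl hl0 hdvd hle ab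
    have hk : pwA 10 (l - 1) = ((10 ^ (l.toNat - 1) : Nat) : Int) := by
      rw [pwA_toNat 10 (l - 1) (by norm_num)]
      norm_num
      try (congr 1; omega)
    have hl2 : 2 ≤ l := by
      by_contra hc
      have h01 : l.toNat - 1 = 0 := by omega
      rw [hk, h01] at h2
      norm_num at h2
      omega
    have hdvd' : 10 ^ ((l - 1).toNat - 1) ∣ (last.toNat + 1) :=
      dvd_trans (pow_dvd_pow 10 (by omega)) hdvd
    have hle' : 10 ^ ((l - 1).toNat - 1) ≤ last.toNat + 1 :=
      le_trans (Nat.pow_le_pow_right (by norm_num) (by omega)) hle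
    exact ih (by omega) hl0 hdvd' hle' ab
  | case4 l last acc hw =>
    intro hl hl0 hdvd hle ab
    have hmax : max (L - 1) last = last := max_eq_right (by omega)
    rw [hmax]
    omega

theorem solution_fastest_eq_cnt (L R : Int) :
    solution_fastest L R = (cnt (R.toNat + 1) : Int) - (cnt ((L - 1).toNat + 1) : Int) := by
  unfold solution_fastest
  show (procAllA (loop2RA R (loop1A R 1 0 []).2.1 (loop1A R 1 0 []).2.2 (loop1A R 1 0 []).1) (0, false)).1 -
      (procAllA (loop2LA L (loop1A L 1 0 []).2.1 (loop1A L 1 0 []).2.2 (loop1A L 1 0 []).1)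
        (0, (procAllA (loop2RA R (loop1A R 1 0 []).2.1 (loop1A R 1 0 []).2.2 (loop1A R 1 0 []).1) (0, false)).2)).1 = _
  obtain ⟨hsumR, hl1R, hl0R, htnR, _, hlastR⟩ :=
    loop1A_spec R 1 0 [] (by norm_num) (by norm_num) (by norm_num)
  obtain ⟨hsumL, hl1L, hl0L, htnL, _, hlastL⟩ :=
    loop1A_spec L 1 0 [] (by norm_num) (by norm_num) (by norm_num)
  have hR := loop2RA_spec R (loop1A R 1 0 []).2.1 (loop1A R 1 0 []).2.2 (loop1A R 1 0 []).1
    hl1R hl0R (htnR ▸ dvd_refl _) (htnR ▸ le_refl _) (0, false)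
  have hL := loop2LA_spec L (loop1A L 1 0 []).2.1 (loop1A L 1 0 []).2.2 (loop1A L 1 0 []).1
    hl1L hl0L (htnL ▸ dvd_refl _) (htnL ▸ le_refl _)
  rw [hR, hsumR (0, false)]
  have hmR : (max R (loop1A R 1 0 []).2.2).toNat = R.toNat := by
    rcases hlastR with h | h <;> omega
  have hmL : (max (L - 1) (loop1A L 1 0 []).2.2).toNat = (L - 1).toNat := by
    rcases hlastL with h | h <;> omega
  rw [hmR]
  set bR := (procAllA (loop2RA R (loop1A R 1 0 []).2.1 (loop1A R 1 0 []).2.2 (loop1A R 1 0 []).1) (0, false)).2 with hbR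
  rw [hL (0, bR), hsumL (0, bR), hmL]
  have h0 : (procAllA [] ((0 : Int), false)).1 = 0 := rfl
  have h0' : (procAllA [] ((0 : Int), bR)).1 = 0 := rfl
  rw [h0, h0']
  ring

theorem scanB_cons (c : Char) (rest : List Char) (m i total : Int) :
    scanB (c :: rest) m i total =
      (if PySem.Int.mod (digitIntB c) 2 ≠ PySem.Int.mod (i + 1) 2 then
        total + ((PySem.List.pyRange (if i == 0 then (1:Int) else 0) (digitIntB c) 1).filter
            (fun x => PySem.Int.mod x 2 == PySem.Int.mod (i + 1) 2)).length * (5 : Int) ^ (m - 1 - i).toNat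
      else scanB rest m (i + 1)
        (total + ((PySem.List.pyRange (if i == 0 then (1:Int) else 0) (digitIntB c) 1).filter
            (fun x => PySem.Int.mod x 2 == PySem.Int.mod (i + 1) 2)).length * (5 : Int) ^ (m - 1 - i).toNat)) := rfl

theorem filter_parity_count (a d b : Nat) :
    ((PySem.List.pyRange (a : Int) (d : Int) 1).filter
        (fun x => PySem.Int.mod x 2 == ((b : Nat) : Int))).length
      = (List.range (d - a)).countP (fun k => (a + k) % 2 == b) := by
  rw [PySem.List.pyRange_one, List.filter_map, List.length_map,
    ← List.countP_eq_length_filter]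
  have ht : (((d : Nat) : Int) - ((a : Nat) : Int)).toNat = d - a := by omega
  rw [ht]
  apply List.countP_congr
  intro k _
  simp only [Function.comp]
  have hc : ((a : Int) + (k : Int)) = (((a + k : Nat)) : Int) := by push_cast; ring
  have hmk : PySem.Int.mod (((a + k : Nat)) : Int) 2 = (((a + k) % 2 : Nat) : Int) :=
    PySem.Int.mod_natCast (a + k) 2
  rw [hc, hmk]
  simp [Nat.cast_inj]
  omega

theorem okL_snoc_digit (P x : Nat) (hP : 1 ≤ P) (hx : x < 10) :
    okL (dBE (P * 10 + x)) 0 = (okL (dBE P) 0 && (x % 2 == ((dBE P).length + 1) % 2)) := by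
  rw [dBE_append_digit P x hP hx, okL_append]
  simp [okL, Nat.zero_add]

theorem scanB_spec : ∀ (ds : List Nat) (P n : Nat), 1 ≤ P → okL (dBE P) 0 = true →
    dBE n = dBE P ++ ds →
    scanB (ds.map Nat.digitChar) (((dBE n).length : Nat) : Int) (((dBE P).length : Nat) : Int)
      ((cnt (P * 10 ^ ds.length) : Nat) : Int) = ((cnt (n + 1) : Nat) : Int) := by
  intro ds
  induction ds with
  | nil =>
    intro P n hP hok hsplit
    rw [List.append_nil] at hsplit
    have hn : n = P := dBE_inj hsplit
    subst hn
    show ((cnt (n * 10 ^ ([] : List Nat).length) : Nat) : Int) + 1 = _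
    have hb : beautB n = true := by
      rw [beautB_pos n (by omega)]
      rw [hsplit]
      exact hok
    rw [cnt_succ n, hb]
    norm_num
  | cons d tl ih =>
    intro P n hP hok hsplit
    have hlenP : 1 ≤ (dBE P).length := by
      have : dBE P ≠ [] := fun h => by simp [dBE_eq_nil_iff.1 h] at hP
      cases hE : dBE P
      · exact absurd hE this
      · simp [hE]
    have hd10 : d < 10 := digits_lt_dBE n d (by rw [hsplit]; simp)
    have htl10 : ∀ x ∈ tl, x < 10 := fun x hx => digits_lt_dBE n x (by rw [hsplit]; simp [hx])
    have hlenn : (dBE n).length = (dBE P).length + (tl.length + 1) := by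
      rw [hsplit]; simp
    set P' := P * 10 + d with hP'def
    have hP'1 : 1 ≤ P' := by omega
    have hsplit' : dBE n = dBE P' ++ tl := by
      rw [hsplit, dBE_append_digit P d hP hd10, List.append_assoc]
      rfl
    have hlenP' : (dBE P').length = (dBE P).length + 1 := by
      rw [dBE_append_digit P d hP hd10]; simp
    simp only [List.map_cons]
    rw [scanB_cons]
    have hi0 : ((((dBE P).length : Nat) : Int) == 0) = false := by
      rw [beq_eq_false_iff_ne]
      intro h
      omega
    rw [hi0]
    have hwant : PySem.Int.mod ((((dBE P).length : Nat) : Int) + 1) 2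
        = ((((dBE P).length + 1) % 2 : Nat) : Int) := by
      rw [show ((((dBE P).length : Nat) : Int) + 1) = (((dBE P).length + 1 : Nat) : Int) by push_cast; ring]
      exact PySem.Int.mod_natCast _ 2
    rw [digitIntB_digitChar d hd10, hwant]
    have hmodd : PySem.Int.mod ((d : Nat) : Int) 2 = ((d % 2 : Nat) : Int) := PySem.Int.mod_natCast d 2
    rw [hmodd]
    have hexp : (((((dBE n).length : Nat)) : Int) - 1 - (((dBE P).length : Nat) : Int)).toNat = tl.length := by
      omega
    rw [show (if (false = true) then (1:Int) else 0) = ((0 : Nat) : Int) by norm_num]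
    rw [filter_parity_count 0 d (((dBE P).length + 1) % 2), hexp]
    have hcount : (List.range (d - 0)).countP (fun k => (0 + k) % 2 == ((dBE P).length + 1) % 2)
        = (List.range d).countP (fun x => okL (dBE (P * 10 + x)) 0) := by
      rw [Nat.sub_zero]
      apply List.countP_congr
      intro x hx
      rw [okL_snoc_digit P x hP (by have := List.mem_range.1 hx; omega), hok]
      simp
    have htotal : ((cnt (P * 10 ^ (d :: tl).length) : Nat) : Int) +
        ((List.range (d - 0)).countP (fun k => (0 + k) % 2 == ((dBE P).length + 1) % 2) : Nat)
          * (5:Int) ^ tl.length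
        = ((cnt (P' * 10 ^ tl.length) : Nat) : Int) := by
      rw [hcount]
      have hstep := cnt_mul_step (P * 10) tl.length (by omega) d
      have hpow : P * 10 ^ (d :: tl).length = P * 10 * 10 ^ tl.length := by
        simp [List.length_cons]
        ring
      rw [hpow, hP'def, show P * 10 + d = P * 10 + d from rfl]
      rw [hstep]
      push_cast
      ring
    rw [htotal]
    by_cases hpar : d % 2 = ((dBE P).length + 1) % 2
    · rw [if_neg (by simp [hpar])]
      have hok' : okL (dBE P') 0 = true := by
        rw [okL_snoc_digit P d hP hd10, hok]
        simp [hpar]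
      have := ih P' n hP'1 hok' hsplit'
      rw [hlenP'] at this
      rw [show ((((dBE P).length : Nat) : Int) + 1) = (((dBE P).length + 1 : Nat) : Int) by push_cast; ring]
      exact this
    · rw [if_pos (by simp [hpar]; omega)]
      have hok' : okL (dBE P') 0 = false := by
        rw [okL_snoc_digit P d hP hd10, hok]
        simp [hpar]
      obtain ⟨hval, hlt⟩ := split_of_dBE_eq hsplit'
      have hcnt := cnt_add (P' * 10 ^ tl.length) (valBE tl + 1)
      have hzero : (List.range (valBE tl + 1)).countP
          (fun t => beautB (P' * 10 ^ tl.length + t)) = 0 :=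
        countP_block_zero tl.length P' (valBE tl + 1) hP'1 hok' (by omega)
      rw [hzero] at hcnt
      have hn1 : n + 1 = P' * 10 ^ tl.length + (valBE tl + 1) := by omega
      rw [hn1, hcnt]
      push_cast
      ring

theorem sum_pow5_pyRange : ∀ w : Nat,
    (((PySem.List.pyRange 1 ((w : Int) + 1) 1).map (fun j => (5 : Int) ^ j.toNat)).sum)
      = ((cnt (10 ^ w) : Nat) : Int) := by
  intro w
  induction w with
  | zero =>
    have h : PySem.List.pyRange 1 (((0:Nat) : Int) + 1) 1 = [] := by
      rw [PySem.List.pyRange_one]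
      norm_num
    rw [h]
    simp [cnt_one]
  | succ w ih =>
    have hsp : PySem.List.pyRange 1 (((w + 1 : Nat) : Int) + 1) 1
        = PySem.List.pyRange 1 ((w : Int) + 1) 1 ++ [(w : Int) + 1] := by
      rw [show (((w + 1 : Nat) : Int) + 1) = ((w : Int) + 1) + 1 by push_cast; ring]
      exact PySem.List.pyRange_one_succ_right (by omega)
    rw [show ((w + 1 : Nat) : Int) = (((w + 1 : Nat) : Int)) from rfl] at hsp
    rw [show (((w:Nat) + 1 : Nat) : Int) + 1 = (((w + 1 : Nat) : Int) + 1) from rfl, hsp,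
      List.map_append, List.sum_append, ih]
    have hx : (((w : Int) + 1)).toNat = w + 1 := by omega
    simp only [List.map_cons, List.map_nil, List.sum_cons, List.sum_nil, hx]
    rw [cnt_pow_succ w]
    push_cast
    ring

theorem countB_eq (x : Int) : countB x = ((cnt (x.toNat + 1) : Nat) : Int) := by
  unfold countB
  by_cases hx : x ≤ 0
  · rw [if_pos hx]
    have h0 : x.toNat = 0 := by omega
    rw [h0, cnt_one]
    norm_num
  · rw [if_neg hx]
    set n := x.toNat with hn
    have hn1 : 1 ≤ n := by omega
    have hxc : x = ((n : Nat) : Int) := by omega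
    obtain ⟨d0, tl, hsplit, hd01, hd09⟩ := dBE_head n (by omega)
    have htl10 : ∀ u ∈ tl, u < 10 := fun u hu => digits_lt_dBE n u (by rw [hsplit]; simp [hu])
    have hchars : PySem.Int.toChars x = Nat.digitChar d0 :: tl.map Nat.digitChar := by
      rw [hxc, toChars_natCast n, if_neg (by omega), hsplit]
      rfl
    have hlen : (dBE n).length = tl.length + 1 := by rw [hsplit]; rfl
    have hdn : dBE n = dBE d0 ++ tl := by
      rw [hsplit, dBE_single hd01 hd09]
      rfl
    rw [hchars]
    show scanB (Nat.digitChar d0 :: tl.map Nat.digitChar)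
        (PySem.List.len (Nat.digitChar d0 :: tl.map Nat.digitChar)) 0
        (((PySem.List.pyRange 1 (PySem.List.len (Nat.digitChar d0 :: tl.map Nat.digitChar)) 1).map
          (fun j => (5 : Int) ^ j.toNat)).sum) = ((cnt (n + 1) : Nat) : Int)
    rw [PySem.List.len_eq]
    simp only [List.length_cons, List.length_map]
    rw [scanB_cons]
    have hstart : (((0:Int)) == 0) = true := rfl
    rw [hstart]
    have hw1 : PySem.Int.mod ((0:Int) + 1) 2 = ((1 : Nat) : Int) := rfl
    rw [hw1, digitIntB_digitChar d0 hd09]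
    have hmodd : PySem.Int.mod ((d0 : Nat) : Int) 2 = ((d0 % 2 : Nat) : Int) :=
      PySem.Int.mod_natCast d0 2
    rw [hmodd]
    rw [show (if (true = true) then (1:Int) else 0) = ((1 : Nat) : Int) by norm_num]
    rw [filter_parity_count 1 d0 1]
    have hexp : ((((tl.length + 1 : Nat)) : Int) - 1 - 0).toNat = tl.length := by omega
    rw [hexp]
    have hinit := sum_pow5_pyRange tl.length
    rw [show ((tl.length : Int) + 1) = (((tl.length + 1 : Nat)) : Int) by push_cast; ring] at hinit
    rw [hinit]
    have hcount : (List.range (d0 - 1)).countP (fun k => (1 + k) % 2 == 1)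
        = (List.range (d0 - 1)).countP (fun y => okL (dBE (1 + y)) 0) := by
      apply List.countP_congr
      intro y hy
      have hy9 : 1 + y < 10 := by have := List.mem_range.1 hy; omega
      rw [dBE_single (by omega) hy9]
      simp [okL]
    have htotal : ((cnt (10 ^ tl.length) : Nat) : Int) +
        ((List.range (d0 - 1)).countP (fun k => (1 + k) % 2 == 1) : Nat) * (5:Int) ^ tl.length
        = ((cnt (d0 * 10 ^ tl.length) : Nat) : Int) := by
      rw [hcount]
      have hstep := cnt_mul_step 1 tl.length (by norm_num) (d0 - 1)
      rw [show 1 + (d0 - 1) = d0 by omega] at hstep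
      rw [hstep]
      push_cast
      ring
    rw [htotal]
    by_cases hpar : d0 % 2 = 1
    · rw [if_neg (by simp [hpar])]
      have hok0 : okL (dBE d0) 0 = true := by
        rw [dBE_single hd01 hd09]
        simp [okL, hpar]
      have := scanB_spec tl d0 n hd01 hok0 hdn
      rw [hlen, dBE_single hd01 hd09] at this
      simp only [List.length_cons, List.length_nil] at this
      rw [show (((tl.length + 1 : Nat)) : Int) = (((tl.length : Nat) + 1 : Nat) : Int) from rfl]
      rw [show ((0:Int) + 1) = (((0 + 1 : Nat)) : Int) by norm_num]
      exact this
    · rw [if_pos (by simp [hpar]; omega)]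
      have hok0 : okL (dBE d0) 0 = false := by
        rw [dBE_single hd01 hd09]
        simp [okL, hpar]
      obtain ⟨hval, hlt⟩ := split_of_dBE_eq hdn
      have hcnt := cnt_add (d0 * 10 ^ tl.length) (valBE tl + 1)
      have hzero : (List.range (valBE tl + 1)).countP
          (fun t => beautB (d0 * 10 ^ tl.length + t)) = 0 :=
        countP_block_zero tl.length d0 (valBE tl + 1) hd01 hok0 (by omega)
      rw [hzero] at hcnt
      have hn1' : n + 1 = d0 * 10 ^ tl.length + (valBE tl + 1) := by omega
      rw [hn1', hcnt]
      push_cast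
      ring

-- ===== VERDICT (by name: the statement is the Claim_ definition above) =====
theorem solution_fastest_spec : Claim_equal_solution_fastest := by
  intro L R _
  unfold Spec_solution_fastest solution_fastest_alt
  rw [solution_fastest_eq_cnt, countB_eq R, countB_eq (L - 1)]
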